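-- pv_equiv track=rewrite | github.com/TeoB2003/FiiMusician | backend/server/k_means.py | atribuie_etichete
-- ===== SOURCE A (Python) =====
-- def atribuie_etichete(centers):
--     labels = ["incepator", "avansat", "expert"]
--     total_scores = [(i, sum(c)) for i, c in enumerate(centers)]
--     sorted_scores = sorted(total_scores, key=lambda x: x[1])
--
--     mapping = {}
--     for rank, (i, _) in enumerate(sorted_scores):
--         label = labels[min(rank, len(labels) - 1)]
--         mapping[i] = label
--     return mapping
-- ===== SOURCE B (Python) =====
-- def atribuie_etichete(centers):
--     scores = [(i, sum(c)) for i, c in enumerate(centers)]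
--     mapping = {}
--     if not scores:
--         return mapping
--     m1 = min(scores, key=lambda p: p[1])
--     mapping[m1[0]] = "incepator"
--     rest1 = [p for p in scores if p[0] != m1[0]]
--     if rest1:
--         m2 = min(rest1, key=lambda p: p[1])
--         mapping[m2[0]] = "avansat"
--         for i, _ in sorted((p for p in rest1 if p[0] != m2[0]), key=lambda p: p[1]):
--             mapping[i] = "expert"
--     return mapping
-- ===== Notes on version B (the rewrite author's own statement) =====
-- stated objective: alternative
-- what changed: A stably sorts all centers by total score and assigns rank-based labels via a dict loop; B instead picks the first-minimum center for 'incepator' and the first-minimum of the remainder for 'avansat' by linear selection (Python min), and only sorts the remaining centers, which all get 'expert'.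
import Mathlib
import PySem

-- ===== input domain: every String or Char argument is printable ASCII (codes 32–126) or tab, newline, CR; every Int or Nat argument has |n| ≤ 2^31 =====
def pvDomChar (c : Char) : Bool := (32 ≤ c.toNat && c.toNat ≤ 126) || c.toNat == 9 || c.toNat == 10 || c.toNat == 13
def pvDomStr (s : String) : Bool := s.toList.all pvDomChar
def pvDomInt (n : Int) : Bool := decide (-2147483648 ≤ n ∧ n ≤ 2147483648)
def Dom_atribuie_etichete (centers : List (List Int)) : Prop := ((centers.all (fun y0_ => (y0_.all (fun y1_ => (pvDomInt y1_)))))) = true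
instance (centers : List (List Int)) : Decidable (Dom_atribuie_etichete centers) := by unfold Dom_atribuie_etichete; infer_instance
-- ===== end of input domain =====

-- B replaces A's full stable sort + rank loop by two Python-min selections for "incepator"/"avansat"
-- and a sort of only the remaining centers for "expert": an alternative algorithm, same cost class.

-- ===== PORT A =====
def atribuie_etichete (centers : List (List Int)) : List (Int × String) :=
  let labels : List String := ["incepator", "avansat", "expert"]
  let total_scores : List (Int × Int) :=
    (PySem.List.enumerate centers).map (fun p => (p.1, p.2.sum))
  let sorted_scores := PySem.List.sorted total_scores (fun x => x.2)
  let mapping : PySem.Dict Int String :=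
    (PySem.List.enumerate sorted_scores).foldl
      (fun d rp =>
        d.insert rp.2.1 (PySem.List.pyGetD labels (min rp.1 ((labels.length : Int) - 1)) ""))
      PySem.Dict.empty
  mapping.items

-- ===== PORT B =====
def atribuie_etichete_alt (centers : List (List Int)) : List (Int × String) :=
  let scores : List (Int × Int) :=
    (PySem.List.enumerate centers).map (fun p => (p.1, p.2.sum))
  let mapping : PySem.Dict Int String := PySem.Dict.empty
  if scores = [] then mapping.items else
  match PySem.List.min? scores (fun p => p.2) with
  | none => mapping.items   -- unreachable: scores ≠ []
  | some m1 =>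
    let mapping := mapping.insert m1.1 "incepator"
    let rest1 := scores.filter (fun p => p.1 ≠ m1.1)
    if rest1 = [] then mapping.items else
    match PySem.List.min? rest1 (fun p => p.2) with
    | none => mapping.items  -- unreachable: rest1 ≠ []
    | some m2 =>
      let mapping := mapping.insert m2.1 "avansat"
      let mapping :=
        (PySem.List.sorted (rest1.filter (fun p => p.1 ≠ m2.1)) (fun p => p.2)).foldl
          (fun d p => d.insert p.1 "expert") mapping
      mapping.items

-- ===== PRECONDITION & SPEC =====
def Spec_atribuie_etichete (centers : List (List Int)) (out : List (Int × String)) : Prop := out = atribuie_etichete_alt centers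
instance (centers : List (List Int)) (out : List (Int × String)) : Decidable (Spec_atribuie_etichete centers out) := by unfold Spec_atribuie_etichete; infer_instance

-- ===== CLAIM (what is proved, stated in full; the proofs are below) =====
def Claim_equal_atribuie_etichete : Prop := ∀ (centers : List (List Int)), Dom_atribuie_etichete centers → Spec_atribuie_etichete centers (atribuie_etichete centers)

-- ===== LEMMAS AND PROOFS =====

def pvKey (p : Int × Int) : Lex (Int × Int) := toLex (p.2, p.1)
theorem pvKey_le_iff (p q : Int × Int) :
    pvKey p ≤ pvKey q ↔ p.2 < q.2 ∨ (p.2 = q.2 ∧ p.1 ≤ q.1) := by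
  simp [pvKey, Prod.Lex.toLex_le_toLex]
theorem pvKey_injective : Function.Injective pvKey := by
  intro a b h
  have h' : (a.2, a.1) = (b.2, b.1) := toLex.injective h
  cases a; cases b; simp_all

theorem pv_minfold_spec (t : List (Int × Int)) : ∀ (m0 m : Int × Int),
    t.Pairwise (fun a b => a.1 < b.1) → (∀ y ∈ t, m0.1 < y.1) →
    PySem.List.min? (m0 :: t) (fun p => p.2) = some m →
    (m = m0 ∨ m ∈ t) ∧ m.2 ≤ m0.2 ∧ (∀ y ∈ t, m.2 ≤ y.2) ∧
      (m.2 = m0.2 → m = m0) ∧ (∀ y ∈ t, y.2 = m.2 → y ≠ m → m.1 < y.1) := by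
  induction t with
  | nil =>
    intro m0 m _ _ h
    simp only [PySem.List.min?, List.foldl_cons, List.foldl_nil, Option.some.injEq] at h
    subst h
    refine ⟨Or.inl rfl, le_refl _, by simp, fun _ => rfl, by simp⟩
  | cons x t ih =>
    intro m0 m hp hlt h
    have hpx : ∀ y ∈ t, x.1 < y.1 := (List.pairwise_cons.mp hp).1
    have hpt : t.Pairwise (fun a b => a.1 < b.1) := (List.pairwise_cons.mp hp).2
    have hm0x : m0.1 < x.1 := hlt x (List.mem_cons_self)
    by_cases hc : x.2 < m0.2
    · have hred : PySem.List.min? (x :: t) (fun p : Int × Int => p.2) = some m := by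
        rw [PySem.List.min?] at h ⊢
        simp only [List.foldl_cons] at h ⊢
        convert h using 2
        show some x = if x.2 < m0.2 then some x else some m0
        rw [if_pos hc]
      obtain ⟨h1, h2, h3, h4, h5⟩ := ih x m hpt hpx hred
      have hmem : m ∈ x :: t := by
        rcases h1 with rfl | h1
        · exact List.mem_cons_self
        · exact List.mem_cons_of_mem _ h1
      refine ⟨Or.inr hmem, le_of_lt (lt_of_le_of_lt h2 hc), ?_, ?_, ?_⟩
      · intro y hy
        rcases List.mem_cons.mp hy with rfl | hy
        · exact h2
        · exact h3 y hy
      · intro he; exact absurd he (ne_of_lt (lt_of_le_of_lt h2 hc))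
      · intro y hy hy2 hym
        rcases List.mem_cons.mp hy with rfl | hy
        · exact absurd (h4 hy2.symm) (Ne.symm hym)
        · exact h5 y hy hy2 hym
    · have hred : PySem.List.min? (m0 :: t) (fun p : Int × Int => p.2) = some m := by
        rw [PySem.List.min?] at h ⊢
        simp only [List.foldl_cons] at h ⊢
        convert h using 2
        show some m0 = if x.2 < m0.2 then some x else some m0
        rw [if_neg hc]
      push Not at hc
      obtain ⟨h1, h2, h3, h4, h5⟩ := ih m0 m hpt (fun y hy => lt_trans hm0x (hpx y hy)) hred
      refine ⟨?_, h2, ?_, h4, ?_⟩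
      · rcases h1 with h1 | h1
        · exact Or.inl h1
        · exact Or.inr (List.mem_cons_of_mem _ h1)
      · intro y hy
        rcases List.mem_cons.mp hy with rfl | hy
        · exact le_trans h2 hc
        · exact h3 y hy
      · intro y hy hy2 hym
        rcases List.mem_cons.mp hy with rfl | hy
        · have hmm0 : m = m0 := h4 (le_antisymm h2 (hy2 ▸ hc))
          rw [hmm0]; exact hm0x
        · exact h5 y hy hy2 hym

theorem pv_min_spec (xs : List (Int × Int)) (m : Int × Int)
    (hp : xs.Pairwise (fun a b => a.1 < b.1))
    (h : PySem.List.min? xs (fun p => p.2) = some m) :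
    m ∈ xs ∧ (∀ y ∈ xs, m.2 ≤ y.2) ∧ (∀ y ∈ xs, y.2 = m.2 → y ≠ m → m.1 < y.1) := by
  cases xs with
  | nil => simp [PySem.List.min?] at h
  | cons x t =>
    have hpx : ∀ y ∈ t, x.1 < y.1 := (List.pairwise_cons.mp hp).1
    have hpt : t.Pairwise (fun a b => a.1 < b.1) := (List.pairwise_cons.mp hp).2
    obtain ⟨h1, h2, h3, h4, h5⟩ := pv_minfold_spec t x m hpt hpx h
    refine ⟨?_, ?_, ?_⟩
    · rcases h1 with rfl | h1
      · exact List.mem_cons_self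
      · exact List.mem_cons_of_mem _ h1
    · intro y hy
      rcases List.mem_cons.mp hy with rfl | hy
      · exact h2
      · exact h3 y hy
    · intro y hy hy2 hym
      rcases List.mem_cons.mp hy with rfl | hy
      · exact absurd (h4 hy2.symm) (Ne.symm hym)
      · exact h5 y hy hy2 hym

theorem pv_ins_pairwise (x : Int × Int) (acc : List (Int × Int))
    (hp : acc.Pairwise (fun a b => pvKey a ≤ pvKey b)) (hlt : ∀ a ∈ acc, a.1 < x.1) :
    (PySem.List.insertBy (fun a b => decide (a.2 < b.2)) x acc).Pairwise
      (fun a b => pvKey a ≤ pvKey b) := by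
  induction acc with
  | nil => simp [PySem.List.insertBy]
  | cons y ys ih =>
    have hpy : ∀ z ∈ ys, pvKey y ≤ pvKey z := (List.pairwise_cons.mp hp).1
    have hpys : ys.Pairwise (fun a b => pvKey a ≤ pvKey b) := (List.pairwise_cons.mp hp).2
    show (if (decide (x.2 < y.2)) = true then x :: y :: ys
          else y :: PySem.List.insertBy (fun a b => decide (a.2 < b.2)) x ys).Pairwise _
    by_cases hc : x.2 < y.2
    · rw [if_pos (by simpa using hc)]
      refine List.pairwise_cons.mpr ⟨?_, hp⟩
      intro z hz
      rcases List.mem_cons.mp hz with rfl | hz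
      · exact (pvKey_le_iff x z).mpr (Or.inl hc)
      · have hyz := hpy z hz
        rcases (pvKey_le_iff y z).mp hyz with h | ⟨h1, _⟩
        · exact (pvKey_le_iff x z).mpr (Or.inl (lt_trans hc h))
        · exact (pvKey_le_iff x z).mpr (Or.inl (h1 ▸ hc))
    · rw [if_neg (by simpa using hc)]
      push Not at hc
      refine List.pairwise_cons.mpr ⟨?_, ih hpys (fun a ha => hlt a (List.mem_cons_of_mem _ ha))⟩
      intro z hz
      rcases (PySem.List.mem_insertBy _ _ _ _).mp hz with rfl | hz
      · rcases lt_or_eq_of_le hc with h | h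
        · exact (pvKey_le_iff y z).mpr (Or.inl h)
        · exact (pvKey_le_iff y z).mpr (Or.inr ⟨h, le_of_lt (hlt y List.mem_cons_self)⟩)
      · exact hpy z hz

theorem pv_sortfold (xs : List (Int × Int)) : ∀ (acc : List (Int × Int)),
    xs.Pairwise (fun a b => a.1 < b.1) →
    acc.Pairwise (fun a b => pvKey a ≤ pvKey b) →
    (∀ a ∈ acc, ∀ b ∈ xs, a.1 < b.1) →
    (xs.foldl (fun acc x => PySem.List.insertBy (fun a b => decide (a.2 < b.2)) x acc) acc).Pairwise
      (fun a b => pvKey a ≤ pvKey b) := by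
  induction xs with
  | nil => intro acc _ hacc _; simpa using hacc
  | cons x t ih =>
    intro acc hp hacc hcross
    simp only [List.foldl_cons]
    refine ih _ (List.pairwise_cons.mp hp).2
      (pv_ins_pairwise x acc hacc (fun a ha => hcross a ha x List.mem_cons_self)) ?_
    intro a ha b hb
    rcases (PySem.List.mem_insertBy _ _ _ _).mp ha with rfl | ha
    · exact (List.pairwise_cons.mp hp).1 b hb
    · exact hcross a ha b (List.mem_cons_of_mem _ hb)

theorem pv_sorted_stable (xs : List (Int × Int)) (hp : xs.Pairwise (fun a b => a.1 < b.1)) :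
    (PySem.List.sorted xs (fun p => p.2)).Pairwise (fun a b => pvKey a ≤ pvKey b) := by
  rw [PySem.List.sorted_eq_foldl_insertBy]
  exact pv_sortfold xs [] hp (by simp) (by simp)

theorem pv_perm_cons_filter (xs : List (Int × Int)) (m : Int × Int)
    (hp : xs.Pairwise (fun a b => a.1 < b.1)) (hm : m ∈ xs) :
    xs.Perm (m :: xs.filter (fun p => decide (p.1 ≠ m.1))) := by
  induction xs with
  | nil => cases hm
  | cons x t ih =>
    have hpx : ∀ y ∈ t, x.1 < y.1 := (List.pairwise_cons.mp hp).1
    have hpt : t.Pairwise (fun a b => a.1 < b.1) := (List.pairwise_cons.mp hp).2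
    rcases List.mem_cons.mp hm with rfl | hm
    · rw [List.filter_cons, if_neg (by simp)]
      have ht : t.filter (fun p => decide (p.1 ≠ m.1)) = t :=
        List.filter_eq_self.mpr (fun y hy => by simpa using ne_of_gt (hpx y hy))
      rw [ht]
    · have hne : x.1 ≠ m.1 := ne_of_lt (hpx m hm)
      rw [List.filter_cons, if_pos (by simpa using hne)]
      exact ((ih hpt hm).cons x).trans (List.Perm.swap m x _)

-- the list A's dict-building loop produces: ranked labels over the sorted scores
theorem pv_A_eq (centers : List (List Int)) :
    atribuie_etichete centers =
      (PySem.List.enumerate (PySem.List.sorted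
          ((PySem.List.enumerate centers).map (fun p => (p.1, p.2.sum))) (fun x => x.2))).map
        (fun rp => (rp.2.1, PySem.List.pyGetD ["incepator", "avansat", "expert"] (min rp.1 2) "")) := by
  simp only [atribuie_etichete]
  set L : List (Int × Int) := (PySem.List.enumerate centers).map (fun p => (p.1, p.2.sum)) with hLdef
  set S := PySem.List.sorted L (fun x : Int × Int => x.2) with hSdef
  have hpL : L.Pairwise (fun a b => a.1 < b.1) := by
    rw [hLdef]
    exact List.pairwise_map.mpr (PySem.List.pairwise_lt_enumerate centers 0)
  have hnd : ((PySem.List.enumerate S).map (fun rp : Int × (Int × Int) => rp.2.1)).Nodup := by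
    have h1 : (PySem.List.enumerate S).map (fun rp : Int × (Int × Int) => rp.2.1)
        = S.map (fun p => p.1) := by
      have := PySem.List.map_snd_enumerate S 0
      calc (PySem.List.enumerate S).map (fun rp : Int × (Int × Int) => rp.2.1)
          = ((PySem.List.enumerate S).map (fun rp : Int × (Int × Int) => rp.2)).map (fun p => p.1) := by
            rw [List.map_map]; rfl
        _ = S.map (fun p => p.1) := by rw [this]
    rw [h1]
    have hperm : (S.map (fun p : Int × Int => p.1)).Perm (L.map (fun p : Int × Int => p.1)) :=
      (PySem.List.sorted_perm L _ _).map _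
    refine hperm.nodup_iff.mpr ?_
    have hm : (L.map (fun p : Int × Int => p.1)).Pairwise (· < ·) := List.pairwise_map.mpr hpL
    exact hm.nodup
  have hfold := PySem.Dict.items_foldl_insert_fresh
      (l := PySem.List.enumerate S) (k := fun rp : Int × (Int × Int) => rp.2.1)
      (v := fun rp : Int × (Int × Int) =>
        PySem.List.pyGetD ["incepator", "avansat", "expert"]
          (min rp.1 (((["incepator", "avansat", "expert"] : List String).length : Int) - 1)) "")
      (d := PySem.Dict.empty) (by intro a _; exact PySem.Dict.contains_empty _) hnd
  simp only [] at hfold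
  simp only [hfold]
  simp only [PySem.Dict.empty, List.nil_append]
  refine List.map_congr_left ?_
  intro rp _
  norm_num

-- ranks ≥ 2 all read label "expert"
theorem pv_expert_map (t : List (Int × Int)) : ∀ s : Int, 2 ≤ s →
    (PySem.List.enumerate t s).map
      (fun rp => (rp.2.1, PySem.List.pyGetD ["incepator", "avansat", "expert"] (min rp.1 2) "")) =
    t.map (fun p => (p.1, "expert")) := by
  induction t with
  | nil => intro s _; simp [PySem.List.enumerate_nil]
  | cons x t ih =>
    intro s hs
    rw [PySem.List.enumerate_cons]
    simp only [List.map_cons]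
    rw [ih (s + 1) (by omega)]
    have h2 : min s 2 = 2 := min_eq_right hs
    rw [h2]
    rfl

theorem pv_main (centers : List (List Int)) :
    atribuie_etichete centers = atribuie_etichete_alt centers := by
  rw [pv_A_eq]
  simp only [atribuie_etichete_alt]
  set L : List (Int × Int) := (PySem.List.enumerate centers).map (fun p => (p.1, p.2.sum)) with hLdef
  have hpL : L.Pairwise (fun a b => a.1 < b.1) := by
    rw [hLdef]
    exact List.pairwise_map.mpr (PySem.List.pairwise_lt_enumerate centers 0)
  by_cases hLnil : L = []
  · rw [if_pos hLnil, hLnil]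
    rfl
  rw [if_neg hLnil]
  obtain ⟨m1, h1⟩ : ∃ m1, PySem.List.min? L (fun p : Int × Int => p.2) = some m1 := by
    cases hmin : PySem.List.min? L (fun p : Int × Int => p.2) with
    | none => exact absurd ((PySem.List.min?_eq_none_iff _ _).mp hmin) hLnil
    | some m => exact ⟨m, rfl⟩
  rw [h1]
  dsimp only
  obtain ⟨hm1mem, hm1min, hm1first⟩ := pv_min_spec L m1 hpL h1
  set R1 : List (Int × Int) := L.filter (fun p => decide (p.1 ≠ m1.1)) with hR1def
  have hpR1 : R1.Pairwise (fun a b => a.1 < b.1) := hpL.sublist List.filter_sublist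
  have hperm1 : L.Perm (m1 :: R1) := pv_perm_cons_filter L m1 hpL hm1mem
  by_cases hR1nil : R1 = []
  · -- single center: L = [m1]
    rw [if_pos hR1nil]
    have hLone : L = [m1] := List.perm_singleton.mp (by rw [hR1nil] at hperm1; exact hperm1)
    rw [hLone]
    rw [PySem.List.sorted_eq_self_of_pairwise _ _ (List.pairwise_singleton _ _)]
    rfl
  rw [if_neg hR1nil]
  obtain ⟨m2, h2⟩ : ∃ m2, PySem.List.min? R1 (fun p : Int × Int => p.2) = some m2 := by
    cases hmin : PySem.List.min? R1 (fun p : Int × Int => p.2) with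
    | none => exact absurd ((PySem.List.min?_eq_none_iff _ _).mp hmin) hR1nil
    | some m => exact ⟨m, rfl⟩
  rw [h2]
  dsimp only
  obtain ⟨hm2mem, hm2min, hm2first⟩ := pv_min_spec R1 m2 hpR1 h2
  set R2 : List (Int × Int) := R1.filter (fun p => decide (p.1 ≠ m2.1)) with hR2def
  have hpR2 : R2.Pairwise (fun a b => a.1 < b.1) := hpR1.sublist List.filter_sublist
  have hperm2 : R1.Perm (m2 :: R2) := pv_perm_cons_filter R1 m2 hpR1 hm2mem
  set S2 := PySem.List.sorted R2 (fun p : Int × Int => p.2) with hS2def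
  -- membership facts
  have hmemR1 : ∀ z ∈ R1, z ∈ L ∧ z.1 ≠ m1.1 := by
    intro z hz
    have := List.mem_filter.mp (hR1def ▸ hz)
    exact ⟨this.1, by simpa using this.2⟩
  have hmemR2 : ∀ z ∈ R2, z ∈ R1 ∧ z.1 ≠ m2.1 := by
    intro z hz
    have := List.mem_filter.mp (hR2def ▸ hz)
    exact ⟨this.1, by simpa using this.2⟩
  have hm2L : m2 ∈ L := (hmemR1 m2 hm2mem).1
  have hm2ne : m2.1 ≠ m1.1 := (hmemR1 m2 hm2mem).2
  -- key ordering facts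
  have hkey1 : ∀ z ∈ L, z.1 ≠ m1.1 → pvKey m1 ≤ pvKey z := by
    intro z hz hzne
    have hle := hm1min z hz
    rcases lt_or_eq_of_le hle with h | h
    · exact (pvKey_le_iff _ _).mpr (Or.inl h)
    · have : m1.1 < z.1 := hm1first z hz h.symm (fun he => hzne (he ▸ rfl))
      exact (pvKey_le_iff _ _).mpr (Or.inr ⟨h, le_of_lt this⟩)
  have hkey2 : ∀ z ∈ R1, z.1 ≠ m2.1 → pvKey m2 ≤ pvKey z := by
    intro z hz hzne
    have hle := hm2min z hz
    rcases lt_or_eq_of_le hle with h | h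
    · exact (pvKey_le_iff _ _).mpr (Or.inl h)
    · have : m2.1 < z.1 := hm2first z hz h.symm (fun he => hzne (he ▸ rfl))
      exact (pvKey_le_iff _ _).mpr (Or.inr ⟨h, le_of_lt this⟩)
  -- the sorted list IS m1 :: m2 :: S2
  have hsorted : PySem.List.sorted L (fun x : Int × Int => x.2) = m1 :: m2 :: S2 := by
    apply PySem.List.eq_of_perm_of_pairwise_le_of_injective pvKey pvKey_injective
    · exact (PySem.List.sorted_perm L _ _).trans
        (hperm1.trans ((hperm2.trans ((PySem.List.sorted_perm R2 _ _).symm.cons m2)).cons m1))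
    · exact pv_sorted_stable L hpL
    · refine List.pairwise_cons.mpr ⟨?_, List.pairwise_cons.mpr ⟨?_, pv_sorted_stable R2 hpR2⟩⟩
      · intro z hz
        rcases List.mem_cons.mp hz with rfl | hz
        · exact hkey1 z hm2L hm2ne
        · have hzR2 := ((PySem.List.mem_sorted _ _ _ _).mp (hS2def ▸ hz))
          have h := hmemR2 z hzR2
          exact hkey1 z (hmemR1 z h.1).1 (hmemR1 z h.1).2
      · intro z hz
        have hzR2 := ((PySem.List.mem_sorted _ _ _ _).mp (hS2def ▸ hz))
        have h := hmemR2 z hzR2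
        exact hkey2 z h.1 h.2
  rw [hsorted]
  -- left side: enumerate and label
  rw [PySem.List.enumerate_cons, PySem.List.enumerate_cons]
  simp only [List.map_cons]
  rw [pv_expert_map S2 (0 + 1 + 1) (by norm_num)]
  -- right side: dict items
  have hndS2 : (S2.map (fun p : Int × Int => p.1)).Nodup := by
    have hperm : (S2.map (fun p : Int × Int => p.1)).Perm (R2.map (fun p : Int × Int => p.1)) :=
      (PySem.List.sorted_perm R2 _ _).map _
    refine hperm.nodup_iff.mpr ?_
    have hm : (R2.map (fun p : Int × Int => p.1)).Pairwise (· < ·) := List.pairwise_map.mpr hpR2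
    exact hm.nodup
  have hfold := PySem.Dict.items_foldl_insert_fresh
      (l := S2) (k := fun p : Int × Int => p.1) (v := fun _ : Int × Int => "expert")
      (d := (PySem.Dict.empty.insert m1.1 "incepator").insert m2.1 "avansat")
      (by
        intro p hp
        have hzR2 := (PySem.List.mem_sorted _ _ _ _).mp (hS2def ▸ hp)
        have h := hmemR2 p hzR2
        have hne1 : p.1 ≠ m1.1 := (hmemR1 p h.1).2
        have hne2 : p.1 ≠ m2.1 := h.2
        simp [PySem.Dict.contains_insert, hne1, hne2])
      hndS2
  have hbase : ((PySem.Dict.empty.insert (m1.1 : Int) "incepator").insert m2.1 "avansat").items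
      = [(m1.1, "incepator"), (m2.1, "avansat")] := by
    rw [PySem.Dict.items_insert_of_not_contains _ _
        (by simp [PySem.Dict.contains_insert, hm2ne])]
    rw [PySem.Dict.items_insert_of_not_contains _ _ (by simp)]
    rfl
  simp only [] at hfold
  rw [hfold, hbase]
  have hl0 : PySem.List.pyGetD ["incepator", "avansat", "expert"] (min (0 : Int) 2) "" = "incepator" := by rfl
  have hl1 : PySem.List.pyGetD ["incepator", "avansat", "expert"] (min (0 + 1 : Int) 2) "" = "avansat" := by rfl
  rw [hl0, hl1]
  rfl

-- ===== VERDICT (by name: the statement is the Claim_ definition above) =====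
theorem atribuie_etichete_spec : Claim_equal_atribuie_etichete := by
  intro centers _
  unfold Spec_atribuie_etichete
  exact pv_main centers
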